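-- pv_equiv track=rewrite | github.com/ceselder/cot-oracle | scripts/run_paper_six_tiny_eval_from_saved_rollouts.py | _subset_indices_by_unique_field
-- ===== SOURCE A (Python) =====
-- from typing import Any
--
-- def _subset_indices_by_unique_field(rows: list[dict[str, Any]], field_name: str, n_unique: int) -> list[int]:
--     keep_values: list[Any] = []
--     seen: set[Any] = set()
--     for row in rows:
--         value = row[field_name]
--         if value in seen:
--             continue
--         seen.add(value)
--         keep_values.append(value)
--         if len(keep_values) >= n_unique:
--             break
--     keep_set = set(keep_values)
--     return [idx for idx, row in enumerate(rows) if row[field_name] in keep_set]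
-- ===== SOURCE B (Python) =====
-- def _subset_indices_by_unique_field(rows, field_name, n_unique):
--     keep_set = set()
--     result = []
--     for idx, row in enumerate(rows):
--         value = row[field_name]
--         if value in keep_set:
--             result.append(idx)
--         elif len(keep_set) < n_unique:
--             keep_set.add(value)
--             result.append(idx)
--     return result
-- ===== Notes on version B (the rewrite author's own statement) =====
-- stated objective: simpler
-- what changed: A makes two passes (collect the first n_unique distinct values, then re-scan all rows filtering by membership); B fuses this into one enumerate loop that grows the keep-set and emits indices as it goes.
-- intended difference: When n_unique <= 0 and rows is nonempty, A still keeps the first row's value (its loop breaks only after appending) and returns the indices of every row carrying that value, while B returns [], the intended result of asking for zero unique values. — e.g. on _subset_indices_by_unique_field([[("k", "a")], [("k", "b")]], "k", 0): A returns [0], B returns []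
import Mathlib
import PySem

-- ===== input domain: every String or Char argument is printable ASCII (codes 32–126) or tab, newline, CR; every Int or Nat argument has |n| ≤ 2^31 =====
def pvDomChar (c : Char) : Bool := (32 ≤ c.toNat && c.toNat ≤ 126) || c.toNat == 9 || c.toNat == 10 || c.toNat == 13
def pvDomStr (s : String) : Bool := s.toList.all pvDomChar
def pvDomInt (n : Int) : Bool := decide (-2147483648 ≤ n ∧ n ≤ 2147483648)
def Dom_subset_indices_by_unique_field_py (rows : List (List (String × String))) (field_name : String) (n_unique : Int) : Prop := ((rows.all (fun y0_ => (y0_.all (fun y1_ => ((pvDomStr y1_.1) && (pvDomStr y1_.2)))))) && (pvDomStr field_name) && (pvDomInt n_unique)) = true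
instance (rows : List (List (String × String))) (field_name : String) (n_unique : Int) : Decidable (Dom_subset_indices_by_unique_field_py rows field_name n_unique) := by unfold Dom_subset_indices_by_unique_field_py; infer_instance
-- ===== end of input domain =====

-- B fuses A's two passes into one enumerate loop (same keep-set, same order);
-- for n_unique ≤ 0 on nonempty rows B returns [] where A keeps one value (see D_ below).

-- ===== PORT A =====
-- row[field_name]; total form (default "") — Pre_ guarantees the key is present, where this is exact
def pvField (field_name : String) (row : List (String × String)) : String :=
  (row.lookup field_name).getD ""

-- A's first loop: keep_values / seen, breaking once len(keep_values) >= n_unique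
def pvALoop (f : String) (n : Int) : List (List (String × String)) → List String → PySem.Set String → List String
  | [], keep, _ => keep
  | row :: rest, keep, seen =>
    let value := pvField f row
    if PySem.Set.contains seen value then pvALoop f n rest keep seen
    else
      let seen' := PySem.Set.add seen value
      let keep' := keep ++ [value]
      if n ≤ (keep'.length : Int) then keep'
      else pvALoop f n rest keep' seen'

def subset_indices_by_unique_field_py (rows : List (List (String × String))) (field_name : String) (n_unique : Int) : List Int :=
  let keep_values := pvALoop field_name n_unique rows [] PySem.Set.empty
  let keep_set := PySem.Set.ofList keep_values
  ((PySem.List.enumerate rows 0).filter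
      (fun p => PySem.Set.contains keep_set (pvField field_name p.2))).map (·.1)

-- ===== PORT B =====
-- B's single loop over enumerate(rows): grow keep_set up to n_unique, emit indices as we go
def pvBLoop (f : String) (n : Int) : List (Int × List (String × String)) → PySem.Set String → List Int → List Int
  | [], _, result => result
  | (idx, row) :: rest, keep_set, result =>
    let value := pvField f row
    if PySem.Set.contains keep_set value then
      pvBLoop f n rest keep_set (result ++ [idx])
    else if PySem.Set.len keep_set < n then
      pvBLoop f n rest (PySem.Set.add keep_set value) (result ++ [idx])
    else
      pvBLoop f n rest keep_set result

def subset_indices_by_unique_field_py_alt (rows : List (List (String × String))) (field_name : String) (n_unique : Int) : List Int :=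
  pvBLoop field_name n_unique (PySem.List.enumerate rows 0) PySem.Set.empty []

-- ===== PRECONDITION & SPEC =====
-- Pre_ excludes exactly the inputs where some row lacks field_name: there Python's row[field_name] raises KeyError.
def Pre_subset_indices_by_unique_field_py (rows : List (List (String × String))) (field_name : String) (n_unique : Int) : Prop :=
  (rows.all (fun r => (r.lookup field_name).isSome)) = true
instance (rows : List (List (String × String))) (field_name : String) (n_unique : Int) : Decidable (Pre_subset_indices_by_unique_field_py rows field_name n_unique) := by unfold Pre_subset_indices_by_unique_field_py; infer_instance

def pvWitness_subset_indices_by_unique_field_py : (List (List (String × String))) × String × Int :=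
  ([[("k", "a")], [("k", "b")], [("k", "a")]], "k", 1)

-- When n_unique <= 0 and rows is nonempty, A still keeps the first row's value (its loop breaks only
-- after appending) and returns the indices of every row carrying that value, while B returns [],
-- the intended result of asking for zero unique values.
def D_subset_indices_by_unique_field_py (rows : List (List (String × String))) (field_name : String) (n_unique : Int) : Prop :=
  n_unique ≤ 0 ∧ rows ≠ []
instance (rows : List (List (String × String))) (field_name : String) (n_unique : Int) : Decidable (D_subset_indices_by_unique_field_py rows field_name n_unique) := by unfold D_subset_indices_by_unique_field_py; infer_instance

def Spec_subset_indices_by_unique_field_py (rows : List (List (String × String))) (field_name : String) (n_unique : Int) (out : List Int) : Prop :=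
  ¬ D_subset_indices_by_unique_field_py rows field_name n_unique → out = subset_indices_by_unique_field_py_alt rows field_name n_unique
instance (rows : List (List (String × String))) (field_name : String) (n_unique : Int) (out : List Int) : Decidable (Spec_subset_indices_by_unique_field_py rows field_name n_unique out) := by unfold Spec_subset_indices_by_unique_field_py; infer_instance

def pvDiffWitness_subset_indices_by_unique_field_py : (List (List (String × String))) × String × Int :=
  ([[("k", "a")], [("k", "b")]], "k", 0)
def pvDiffWitnessOut_subset_indices_by_unique_field_py : (List Int) × (List Int) := ([0], [])

-- ===== CLAIM (what is proved, stated in full; the proofs are below) =====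
def Claim_unchanged_subset_indices_by_unique_field_py : Prop := ∀ (rows : List (List (String × String))) (field_name : String) (n_unique : Int), Dom_subset_indices_by_unique_field_py rows field_name n_unique → Pre_subset_indices_by_unique_field_py rows field_name n_unique → Spec_subset_indices_by_unique_field_py rows field_name n_unique (subset_indices_by_unique_field_py rows field_name n_unique)
def Claim_changed_subset_indices_by_unique_field_py : Prop := Dom_subset_indices_by_unique_field_py (pvDiffWitness_subset_indices_by_unique_field_py.1) (pvDiffWitness_subset_indices_by_unique_field_py.2.1) (pvDiffWitness_subset_indices_by_unique_field_py.2.2) ∧ Pre_subset_indices_by_unique_field_py (pvDiffWitness_subset_indices_by_unique_field_py.1) (pvDiffWitness_subset_indices_by_unique_field_py.2.1) (pvDiffWitness_subset_indices_by_unique_field_py.2.2) ∧ D_subset_indices_by_unique_field_py (pvDiffWitness_subset_indices_by_unique_field_py.1) (pvDiffWitness_subset_indices_by_unique_field_py.2.1) (pvDiffWitness_subset_indices_by_unique_field_py.2.2) ∧ subset_indices_by_unique_field_py (pvDiffWitness_subset_indices_by_unique_field_py.1) (pvDiffWitness_subset_indices_by_unique_field_py.2.1) (pvDiffWitness_subset_indices_by_unique_field_py.2.2)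 = pvDiffWitnessOut_subset_indices_by_unique_field_py.1 ∧ subset_indices_by_unique_field_py_alt (pvDiffWitness_subset_indices_by_unique_field_py.1) (pvDiffWitness_subset_indices_by_unique_field_py.2.1) (pvDiffWitness_subset_indices_by_unique_field_py.2.2) = pvDiffWitnessOut_subset_indices_by_unique_field_py.2 ∧ pvDiffWitnessOut_subset_indices_by_unique_field_py.1 ≠ pvDiffWitnessOut_subset_indices_by_unique_field_py.2
def Claim_exact_subset_indices_by_unique_field_py : Prop := ∀ (rows : List (List (String × String))) (field_name : String) (n_unique : Int), Dom_subset_indices_by_unique_field_py rows field_name n_unique → Pre_subset_indices_by_unique_field_py rows field_name n_unique → D_subset_indices_by_unique_field_py rows field_name n_unique → subset_indices_by_unique_field_py rows field_name n_unique ≠ subset_indices_by_unique_field_py_alt rows field_name n_unique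

-- ===== LEMMAS AND PROOFS =====

-- A's loop (run with seen = keep) only APPENDS to keep
theorem pvALoop_prefix (f : String) (n : Int) :
    ∀ (rows : List (List (String × String))) (keep : List String),
    ∃ t, pvALoop f n rows keep keep = keep ++ t := by
  intro rows
  induction rows with
  | nil => intro keep; exact ⟨[], by simp [pvALoop]⟩
  | cons row rest ih =>
    intro keep
    by_cases hv : pvField f row ∈ keep
    · simpa [pvALoop, hv] using ih keep
    · by_cases hn : n ≤ (keep.length : Int) + 1
      · exact ⟨[pvField f row], by simp [pvALoop, hv, hn]⟩
      · obtain ⟨t, ht⟩ := ih (keep ++ [pvField f row])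
        exact ⟨[pvField f row] ++ t, by simp [pvALoop, hv, hn, PySem.Set.add, ht]⟩

theorem mem_pvALoop (f : String) (n : Int) (rows : List (List (String × String)))
    (keep : List String) {v : String} (hv : v ∈ keep) :
    v ∈ pvALoop f n rows keep keep := by
  obtain ⟨t, ht⟩ := pvALoop_prefix f n rows keep
  rw [ht]; exact List.mem_append_left _ hv

-- B's loop once the keep-set is full = filtering by membership in that set
theorem pvBLoop_full (f : String) (n : Int) :
    ∀ (e : List (Int × List (String × String))) (keep : List String) (result : List Int),
    ¬ ((keep.length : Int) < n) →
    pvBLoop f n e keep result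
      = result ++ ((e.filter (fun p => PySem.Set.contains keep (pvField f p.2))).map (·.1)) := by
  intro e
  induction e with
  | nil => intro keep result _; simp [pvBLoop]
  | cons p rest ih =>
    intro keep result h
    obtain ⟨idx, row⟩ := p
    by_cases hv : pvField f row ∈ keep
    · simp [pvBLoop, hv, ih keep (result ++ [idx]) h]
    · simp [pvBLoop, PySem.Set.len, hv, h, ih keep result h]

-- main invariant: while |keep| < n, B's continuation equals A's final filter
theorem pvBLoop_eq_filter (f : String) (n : Int) :
    ∀ (e : List (Int × List (String × String))) (keep : List String) (result : List Int),
    ((keep.length : Int) < n) →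
    pvBLoop f n e keep result
      = result ++ ((e.filter (fun p =>
          PySem.Set.contains (pvALoop f n (e.map (·.2)) keep keep) (pvField f p.2))).map (·.1)) := by
  intro e
  induction e with
  | nil => intro keep result _; simp [pvBLoop, pvALoop]
  | cons p rest ih =>
    intro keep result hlt
    obtain ⟨idx, row⟩ := p
    by_cases hv : pvField f row ∈ keep
    · have hmem : pvField f row ∈ pvALoop f n (rest.map (·.2)) keep keep :=
        mem_pvALoop f n _ keep hv
      simp [pvBLoop, hv, List.map_cons, pvALoop, ih keep (result ++ [idx]) hlt, hmem]
    · by_cases hn : n ≤ (keep.length : Int) + 1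
      · -- A breaks here; B's keep-set becomes full
        have hfull : ¬ (((keep ++ [pvField f row]).length : Int) < n) := by
          simp; omega
        simp [pvBLoop, PySem.Set.len, hv, hlt, List.map_cons, pvALoop, hn,
          pvBLoop_full f n rest (keep ++ [pvField f row]) (result ++ [idx]) hfull]
      · have hlt' : (((keep ++ [pvField f row]).length : Int) < n) := by
          simp; omega
        have hmem : pvField f row
            ∈ pvALoop f n (rest.map (·.2)) (keep ++ [pvField f row]) (keep ++ [pvField f row]) :=
          mem_pvALoop f n _ _ (by simp)
        simp [pvBLoop, PySem.Set.len, hv, hlt, List.map_cons, pvALoop, hn,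
          ih (keep ++ [pvField f row]) (result ++ [idx]) hlt', hmem]

-- membership in set(keep_values) = membership in keep_values
theorem contains_ofList (l : List String) (v : String) :
    PySem.Set.contains (PySem.Set.ofList l) v = PySem.Set.contains l v := by
  rw [Bool.eq_iff_iff]
  rw [PySem.Set.contains_iff, PySem.Set.contains_iff]
  exact PySem.Set.mem_ofList l v

-- B with n ≤ 0 keeps nothing and returns the accumulator unchanged
theorem pvBLoop_nonpos (f : String) (n : Int) (hn : n ≤ 0) :
    ∀ (e : List (Int × List (String × String))) (result : List Int),
    pvBLoop f n e [] result = result := by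
  intro e
  induction e with
  | nil => intro result; rfl
  | cons p rest ih =>
    intro result
    obtain ⟨idx, row⟩ := p
    have h2 : ¬ ((0 : Int) < n) := by omega
    simp [pvBLoop, PySem.Set.len, h2, ih]

theorem subset_indices_by_unique_field_py_spec : Claim_unchanged_subset_indices_by_unique_field_py := by
  intro rows field_name n_unique _ _ hnd
  rcases Decidable.em (0 < n_unique) with hn | hn
  · -- the two programs agree for every positive n_unique
    show subset_indices_by_unique_field_py rows field_name n_unique
        = subset_indices_by_unique_field_py_alt rows field_name n_unique
    simp only [subset_indices_by_unique_field_py, subset_indices_by_unique_field_py_alt,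
      PySem.Set.empty]
    rw [pvBLoop_eq_filter field_name n_unique (PySem.List.enumerate rows 0) [] []
        (by simpa using hn)]
    simp only [PySem.List.map_snd_enumerate, List.nil_append]
    congr 1
    apply List.filter_congr
    intro p _
    rw [contains_ofList]
  · -- outside D_ with n_unique ≤ 0 the rows are empty: both return []
    have hrows : rows = [] := by
      by_contra h
      exact hnd ⟨by omega, h⟩
    subst hrows
    rfl

theorem subset_indices_by_unique_field_py_changed : Claim_changed_subset_indices_by_unique_field_py := by
  unfold Claim_changed_subset_indices_by_unique_field_py; decide

theorem subset_indices_by_unique_field_py_tight : Claim_exact_subset_indices_by_unique_field_py := by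
  intro rows field_name n_unique _ _ hd heq
  obtain ⟨hn, hne⟩ := hd
  obtain ⟨row, rest, rfl⟩ : ∃ r rs, rows = r :: rs := by
    cases rows with
    | nil => exact absurd rfl hne
    | cons r rs => exact ⟨r, rs, rfl⟩
  -- B returns []
  have hb : subset_indices_by_unique_field_py_alt (row :: rest) field_name n_unique = [] := by
    unfold subset_indices_by_unique_field_py_alt
    exact pvBLoop_nonpos field_name n_unique hn _ []
  -- A returns a list starting with index 0 (the first value is kept before the break)
  have hbreak : n_unique ≤ (1 : Int) := by omega
  have ha : subset_indices_by_unique_field_py (row :: rest) field_name n_unique ≠ [] := by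
    simp only [subset_indices_by_unique_field_py, PySem.Set.empty]
    simp [pvALoop, hbreak, PySem.List.enumerate_cons, PySem.Set.ofList]
  exact ha (heq.trans hb)
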